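-- pv_equiv track=rewrite | github.com/arsalanyaghoubi/Lakefront_AI_Ramblers-MEDIQA_SYNUR_2026 | synur_pipeline/error_analysis.py | aggregate_errors
-- ===== SOURCE A (Python) =====
-- from collections import defaultdict
--
-- def aggregate_errors(all_errors):
--
--     totals = defaultdict(int)
--     details = defaultdict(list)
--
--     for transcript_errors in all_errors:
--         for category, items in transcript_errors.items():
--             totals[category] += len(items)
--             details[category].extend(items)
--
--     return dict(totals), dict(details)
-- ===== SOURCE B (Python) =====
-- def aggregate_errors(all_errors):
--     # Group-by: flatten to a (category, items) pair stream, take the distinct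
--     # categories in first-appearance order, then gather each category's items
--     # by a per-category scan of the stream; totals are the gathered lengths.
--     pairs = [(c, items) for t in all_errors for c, items in t.items()]
--     order = dict.fromkeys(c for c, _ in pairs)
--     details = {c: [x for cc, items in pairs if cc == c for x in items]
--                for c in order}
--     totals = {c: len(v) for c, v in details.items()}
--     return totals, details
-- ===== Notes on version B (the rewrite author's own statement) =====
-- stated objective: alternative
-- what changed: B replaces A's fused dict-accumulation loop by a group-by: it flattens all transcripts into one (category, items) pair stream, computes the distinct categories in first-appearance order, then builds each category's detail list by a separate per-category scan of the stream, taking totals as the lengths; no dictionary is mutated during traversal.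
import Mathlib
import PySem

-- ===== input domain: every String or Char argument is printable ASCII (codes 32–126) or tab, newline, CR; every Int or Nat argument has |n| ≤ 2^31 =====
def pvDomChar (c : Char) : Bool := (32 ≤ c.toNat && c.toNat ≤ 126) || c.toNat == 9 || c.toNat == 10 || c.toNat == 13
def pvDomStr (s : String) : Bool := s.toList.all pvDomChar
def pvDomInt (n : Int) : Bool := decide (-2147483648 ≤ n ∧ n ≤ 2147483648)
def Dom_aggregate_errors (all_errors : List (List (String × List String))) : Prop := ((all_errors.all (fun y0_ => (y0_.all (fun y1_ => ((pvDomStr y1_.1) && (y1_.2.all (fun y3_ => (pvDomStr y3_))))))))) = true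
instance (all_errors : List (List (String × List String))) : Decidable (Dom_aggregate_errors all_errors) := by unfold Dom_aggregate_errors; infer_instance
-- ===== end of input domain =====

-- B replaces A's fused dict-accumulation loop by a group-by: flatten to a pair
-- stream, distinct categories in first-appearance order, per-category gather
-- (objective: alternative algorithm, same results).

-- ===== PORT A =====
-- A: one fused loop maintaining totals (defaultdict(int)) and details (defaultdict(list)).
def aggregate_errors (all_errors : List (List (String × List String))) : (List (String × Int)) × (List (String × List String)) :=
  let st := all_errors.foldl
    (fun (st : PySem.Dict String Int × PySem.Dict String (List String)) transcript_errors =>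
      (PySem.Dict.ofList transcript_errors).items.foldl
        (fun st p =>
          (st.1.modify p.1 0 (· + PySem.List.len p.2),
           st.2.modify p.1 [] (· ++ p.2))) st)
    (PySem.Dict.empty, PySem.Dict.empty)
  (st.1.items, st.2.items)

-- ===== PORT B =====
-- B: flatten to a pair stream, dict.fromkeys for the category order, then a
-- per-category comprehension gathering that category's items; totals = lengths.
def aggregate_errors_alt (all_errors : List (List (String × List String))) : (List (String × Int)) × (List (String × List String)) :=
  let pairs := all_errors.flatMap (fun t => (PySem.Dict.ofList t).items)
  let order := PySem.List.dedup (pairs.map Prod.fst)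
  let details := order.map
    (fun c => (c, pairs.flatMap (fun p => if p.1 == c then p.2 else [])))
  let totals := details.map (fun p => (p.1, PySem.List.len p.2))
  (totals, details)

-- ===== PRECONDITION & SPEC =====
def Spec_aggregate_errors (all_errors : List (List (String × List String))) (out : (List (String × Int)) × (List (String × List String))) : Prop := out = aggregate_errors_alt all_errors
instance (all_errors : List (List (String × List String))) (out : (List (String × Int)) × (List (String × List String))) : Decidable (Spec_aggregate_errors all_errors out) := by unfold Spec_aggregate_errors; infer_instance

-- ===== CLAIM =====
def Claim_equal_aggregate_errors : Prop := ∀ (all_errors : List (List (String × List String))), Dom_aggregate_errors all_errors → Spec_aggregate_errors all_errors (aggregate_errors all_errors)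

-- ===== LEMMAS AND PROOFS =====

-- key-preserving value map linking A's totals to A's details
def pvLenPair (p : String × List String) : String × Int := (p.1, PySem.List.len p.2)

theorem pv_get?_map_len (l : List (String × List String)) (c : String) :
    (PySem.Dict.mk (l.map pvLenPair)).get? c
      = ((PySem.Dict.mk l).get? c).map PySem.List.len := by
  induction l with
  | nil => simp [PySem.Dict.get?]
  | cons p rest ih =>
    obtain ⟨k, v⟩ := p
    simp only [List.map_cons, pvLenPair, PySem.Dict.get?_mk_cons]
    by_cases h : k == c <;> simp [h, ih]

theorem pv_modify_items_len (d : PySem.Dict String (List String)) (c : String) (it : List String) :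
    ((PySem.Dict.mk (d.items.map pvLenPair)).modify c 0 (· + PySem.List.len it)).items
      = ((d.modify c [] (· ++ it)).items).map pvLenPair := by
  have hmodT : ∀ (t : PySem.Dict String Int),
      t.modify c 0 (· + PySem.List.len it) = t.insert c (t.getD c 0 + PySem.List.len it) := by
    intro t; simp [PySem.Dict.modify]
  have hmodD : d.modify c [] (· ++ it) = d.insert c (d.getD c [] ++ it) := by
    simp [PySem.Dict.modify]
  rw [hmodT, hmodD]
  have hget := pv_get?_map_len d.items c
  have hd : PySem.Dict.mk d.items = d := rfl
  rw [hd] at hget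
  have hcont : (PySem.Dict.mk (d.items.map pvLenPair)).contains c = d.contains c := by
    rw [PySem.Dict.contains_eq_isSome_get?, PySem.Dict.contains_eq_isSome_get?, hget]
    cases d.get? c <;> rfl
  have hgetD : (PySem.Dict.mk (d.items.map pvLenPair)).getD c 0
      = PySem.List.len (d.getD c []) := by
    rw [PySem.Dict.getD_eq_get?_getD, PySem.Dict.getD_eq_get?_getD, hget]
    cases d.get? c <;> rfl
  rw [PySem.Dict.items_insert, PySem.Dict.items_insert, hcont]
  by_cases h : d.contains c = true
  · simp only [h, if_true, List.map_map]
    apply List.map_congr_left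
    intro p _
    obtain ⟨k, v⟩ := p
    by_cases hp : k = c
    · subst hp
      simp [pvLenPair, hgetD, PySem.List.len_eq, List.length_append]
    · simp [pvLenPair, hp]
  · simp only [h]
    simp [pvLenPair, hgetD, PySem.List.len_eq]

theorem pv_inner_inv (l : List (String × List String)) (d : PySem.Dict String (List String)) :
    l.foldl (fun t p => t.modify p.1 0 (· + PySem.List.len p.2))
        (PySem.Dict.mk (d.items.map pvLenPair))
      = PySem.Dict.mk
          ((l.foldl (fun d p => d.modify p.1 [] (· ++ p.2)) d).items.map pvLenPair) := by
  induction l generalizing d with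
  | nil => rfl
  | cons p rest ih =>
    simp only [List.foldl_cons]
    have h := pv_modify_items_len d p.1 p.2
    have h' : (PySem.Dict.mk (d.items.map pvLenPair)).modify p.1 0 (· + PySem.List.len p.2)
        = PySem.Dict.mk ((d.modify p.1 [] (· ++ p.2)).items.map pvLenPair) := by
      apply PySem.Dict.ext; exact h
    rw [h', ih]

theorem pv_outer_inv (ls : List (List (String × List String))) (d : PySem.Dict String (List String)) :
    ls.foldl
        (fun (st : PySem.Dict String Int × PySem.Dict String (List String)) t =>
          (PySem.Dict.ofList t).items.foldl
            (fun st p =>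
              (st.1.modify p.1 0 (· + PySem.List.len p.2),
               st.2.modify p.1 [] (· ++ p.2))) st)
        (PySem.Dict.mk (d.items.map pvLenPair), d)
      = (let d' := ls.foldl
            (fun d t => (PySem.Dict.ofList t).items.foldl
              (fun d p => d.modify p.1 [] (· ++ p.2)) d) d
         (PySem.Dict.mk (d'.items.map pvLenPair), d')) := by
  induction ls generalizing d with
  | nil => rfl
  | cons t rest ih =>
    simp only [List.foldl_cons]
    rw [PySem.List.foldl_prod_mk
      (fun (t : PySem.Dict String Int) (p : String × List String) =>
        t.modify p.1 0 (· + PySem.List.len p.2))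
      (fun (d : PySem.Dict String (List String)) (p : String × List String) =>
        d.modify p.1 [] (· ++ p.2))
      (PySem.Dict.ofList t).items (PySem.Dict.mk (d.items.map pvLenPair)) d,
      pv_inner_inv]
    exact ih _

-- the details fold, flattened: foldl over a flatMap is the nested foldl
theorem pv_fold_flatMap (ls : List (List (String × List String))) (d : PySem.Dict String (List String)) :
    ls.foldl
        (fun d t => (PySem.Dict.ofList t).items.foldl
          (fun d p => d.modify p.1 [] (· ++ p.2)) d) d
      = (ls.flatMap (fun t => (PySem.Dict.ofList t).items)).foldl
          (fun d p => d.modify p.1 [] (· ++ p.2)) d := by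
  induction ls generalizing d with
  | nil => rfl
  | cons t rest ih => simp [List.foldl_append, ih]

-- lookup in the details fold = concatenation of the matching items in the stream
theorem pv_getD_fold (l : List (String × List String)) (d : PySem.Dict String (List String)) (c : String) :
    (l.foldl (fun d p => d.modify p.1 [] (· ++ p.2)) d).getD c []
      = d.getD c [] ++ l.flatMap (fun p => if p.1 == c then p.2 else []) := by
  induction l generalizing d with
  | nil => simp
  | cons p rest ih =>
    simp only [List.foldl_cons, List.flatMap_cons, ih]
    by_cases h : p.1 = c
    · simp [h, PySem.Dict.getD_modify_self, List.append_assoc]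
    · have h' : (p.1 == c) = false := by simp [h]
      rw [PySem.Dict.getD_modify_of_ne d [] _ (Ne.symm h)]; simp [h']

-- keys of the details fold from empty = distinct categories in stream order
theorem pv_keys_fold (l : List (String × List String)) :
    (l.foldl (fun d p => d.modify p.1 [] (· ++ p.2))
        (PySem.Dict.empty : PySem.Dict String (List String))).keys
      = PySem.List.dedup (l.map Prod.fst) := by
  rw [PySem.Dict.keys_foldl_modify_key (key := Prod.fst)
        (f := fun _ p => (· ++ p.2)) (d0 := []) ]
  simp [PySem.Set.update_nil_left, PySem.List.dedup_eq_ofList]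

theorem pv_nodup_keys_fold (l : List (String × List String)) :
    (l.foldl (fun d p => d.modify p.1 [] (· ++ p.2))
        (PySem.Dict.empty : PySem.Dict String (List String))).keys.Nodup := by
  exact PySem.Dict.nodup_keys_foldl_modify_key l Prod.fst []
    (fun _ p => (· ++ p.2)) PySem.Dict.empty PySem.Dict.nodup_keys_empty

-- items of the details fold = B's group-by list
theorem pv_items_fold (l : List (String × List String)) :
    (l.foldl (fun d p => d.modify p.1 [] (· ++ p.2))
        (PySem.Dict.empty : PySem.Dict String (List String))).items
      = (PySem.List.dedup (l.map Prod.fst)).map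
          (fun c => (c, l.flatMap (fun p => if p.1 == c then p.2 else []))) := by
  rw [PySem.Dict.items_eq_map_keys _ (pv_nodup_keys_fold l) ([] : List String),
      pv_keys_fold]
  apply List.map_congr_left
  intro c _
  simp [pv_getD_fold]

-- ===== VERDICT =====
theorem aggregate_errors_spec : Claim_equal_aggregate_errors := by
  intro all_errors _
  unfold Spec_aggregate_errors aggregate_errors aggregate_errors_alt
  have h0 : (PySem.Dict.empty : PySem.Dict String Int)
      = PySem.Dict.mk ((PySem.Dict.empty : PySem.Dict String (List String)).items.map pvLenPair) := rfl
  rw [h0, pv_outer_inv]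
  simp only [pv_fold_flatMap, pv_items_fold, List.map_map]
  apply Prod.ext
  · apply List.map_congr_left; intro c _; simp [pvLenPair]
  · rfl
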